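-- pv_equiv track=rewrite | github.com/francescoprincipe/connect4 | connect4/QLearningPlayer.py | string_to_tuple
-- ===== SOURCE A (Python) =====
-- def string_to_tuple(state):
--     a = []
--     b = []
--     for i in state:
--         if i == ")":
--             if a!=[]:
--                 b.append(a)
--                 a = []
--         if i == "1" or i == "2" or i == "0":
--             a.append(int(i))
--     result = tuple(tuple(x) for x in b)
--     return result
-- ===== SOURCE B (Python) =====
-- def string_to_tuple(state):
--     segments = state.split(")")[:-1]
--     tuples = [tuple(int(c) for c in seg if c in "012") for seg in segments]
--     return tuple(t for t in tuples if t)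
-- ===== Notes on version B (the rewrite author's own statement) =====
-- stated objective: simpler
-- what changed: Replaced the char-by-char accumulator/flush state machine by splitting on the closing parenthesis with the trailing unterminated segment dropped, extracting the digits 0/1/2 per segment and keeping non-empty groups.
import Mathlib
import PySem

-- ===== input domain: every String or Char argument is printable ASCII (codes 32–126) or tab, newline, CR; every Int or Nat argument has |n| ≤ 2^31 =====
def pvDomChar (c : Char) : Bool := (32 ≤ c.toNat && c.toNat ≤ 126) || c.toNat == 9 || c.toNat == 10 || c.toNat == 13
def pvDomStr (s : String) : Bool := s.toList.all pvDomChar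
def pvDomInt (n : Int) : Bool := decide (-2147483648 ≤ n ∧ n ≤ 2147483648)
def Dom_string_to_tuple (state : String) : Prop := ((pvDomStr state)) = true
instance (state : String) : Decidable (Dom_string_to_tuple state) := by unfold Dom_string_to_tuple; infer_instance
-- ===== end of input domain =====

-- B replaces A's char-by-char accumulator/flush state machine by split-on-')'
-- (dropping the unterminated trailing segment) + per-segment digit extraction: simpler decomposition, same cost.


-- ===== PORT A =====
-- the loop body of A; int(i) on a digit char i is exactly its code minus 48
def pvStepA (st : List Int × List (List Int)) (i : Char) : List Int × List (List Int) :=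
  let st1 := if i = ')' then (if st.1 ≠ [] then (([] : List Int), st.2 ++ [st.1]) else st) else st
  if i = '1' ∨ i = '2' ∨ i = '0' then (st1.1 ++ [((i.toNat : Int) - 48)], st1.2) else st1

def string_to_tuple (state : String) : List (List Int) :=
  (state.toList.foldl pvStepA ([], [])).2

-- ===== PORT B =====
-- int(c) for c in seg if c in "012"
def pvExtract (seg : List Char) : List Int :=
  (seg.filter (fun c => c == '0' || c == '1' || c == '2')).map (fun c => ((c.toNat : Int) - 48))

def string_to_tuple_alt (state : String) : List (List Int) :=
  let segments := (PySem.Chars.splitOn state.toList [')']).dropLast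
  let tuples := segments.map pvExtract
  tuples.filter (fun t => !t.isEmpty)

-- ===== PRECONDITION & SPEC =====
def Spec_string_to_tuple (state : String) (out : List (List Int)) : Prop := out = string_to_tuple_alt state
instance (state : String) (out : List (List Int)) : Decidable (Spec_string_to_tuple state out) := by unfold Spec_string_to_tuple; infer_instance

-- ===== CLAIM (what is proved, stated in full; the proofs are below) =====
def Claim_equal_string_to_tuple : Prop := ∀ (state : String), Dom_string_to_tuple state → Spec_string_to_tuple state (string_to_tuple state)

-- ===== LEMMAS AND PROOFS =====

-- a fuel-free recursion computing str.split(")") on a character list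
def pvMySplit (cs : List Char) : List (List Char) :=
  match cs with
  | [] => [[]]
  | c :: rest =>
      if c = ')' then [] :: pvMySplit rest
      else
        match pvMySplit rest with
        | [] => [[c]]
        | g :: gs => (c :: g) :: gs

lemma pvMySplit_ne_nil (cs : List Char) : pvMySplit cs ≠ [] := by
  match cs with
  | [] => simp [pvMySplit]
  | c :: rest =>
      unfold pvMySplit
      split
      · simp
      · cases h : pvMySplit rest <;> simp

lemma pvGo_spec (l : List Char) (fuel : Nat) (hf : l.length ≤ fuel)
    (cur : List Char) (acc : List (List Char)) :
    PySem.Chars.splitOn.go [')'] (fuel + 1) l cur acc =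
      acc.reverse ++ ((cur.reverse ++ (pvMySplit l).headI) :: (pvMySplit l).tail) := by
  induction l generalizing fuel cur acc with
  | nil => simp [PySem.Chars.splitOn.go, pvMySplit]
  | cons c rest ih =>
      obtain ⟨fuel, rfl⟩ : ∃ f, fuel = f + 1 := ⟨fuel - 1, by simp at hf; omega⟩
      by_cases hc : c = ')'
      · subst hc
        rw [show PySem.Chars.splitOn.go [')'] (fuel + 1 + 1) (')' :: rest) cur acc =
            PySem.Chars.splitOn.go [')'] (fuel + 1) rest [] (cur.reverse :: acc) by
          simp [PySem.Chars.splitOn.go, List.isPrefixOf]]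
        rw [ih fuel (by simp at hf; omega)]
        obtain ⟨g, gs, hg⟩ : ∃ g gs, pvMySplit rest = g :: gs := by
          cases h : pvMySplit rest with
          | nil => exact absurd h (pvMySplit_ne_nil rest)
          | cons g gs => exact ⟨g, gs, rfl⟩
        simp [pvMySplit, hg]
      · rw [show PySem.Chars.splitOn.go [')'] (fuel + 1 + 1) (c :: rest) cur acc =
            PySem.Chars.splitOn.go [')'] (fuel + 1) rest (c :: cur) acc by
          simp [PySem.Chars.splitOn.go, List.isPrefixOf, Ne.symm hc]]
        rw [ih fuel (by simp at hf; omega)]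
        obtain ⟨g, gs, hg⟩ : ∃ g gs, pvMySplit rest = g :: gs := by
          cases h : pvMySplit rest with
          | nil => exact absurd h (pvMySplit_ne_nil rest)
          | cons g gs => exact ⟨g, gs, rfl⟩
        simp [pvMySplit, hc, hg]

lemma pvSplitOn_eq (cs : List Char) :
    PySem.Chars.splitOn cs [')'] = pvMySplit cs := by
  show PySem.Chars.splitOn.go [')'] (cs.length + 1) cs [] [] = pvMySplit cs
  rw [pvGo_spec cs cs.length le_rfl]
  obtain ⟨g, gs, hg⟩ : ∃ g gs, pvMySplit cs = g :: gs := by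
    cases h : pvMySplit cs with
    | nil => exact absurd h (pvMySplit_ne_nil cs)
    | cons g gs => exact ⟨g, gs, rfl⟩
  simp [hg]

-- A's loop without the accumulated output: pending group a, remaining chars cs
def pvGoA (a : List Int) (cs : List Char) : List (List Int) :=
  match cs with
  | [] => []
  | c :: rest =>
      if c = ')' then (if a = [] then pvGoA [] rest else a :: pvGoA [] rest)
      else if c = '1' ∨ c = '2' ∨ c = '0' then pvGoA (a ++ [((c.toNat : Int) - 48)]) rest
      else pvGoA a rest

lemma pvFoldA_spec (cs : List Char) (a : List Int) (b : List (List Int)) :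
    (cs.foldl pvStepA (a, b)).2 = b ++ pvGoA a cs := by
  induction cs generalizing a b with
  | nil => simp [pvGoA]
  | cons c rest ih =>
      by_cases hc : c = ')'
      · subst hc
        by_cases ha : a = []
        · simp [pvStepA, pvGoA, ha, ih]
        · simp [pvStepA, pvGoA, ha, ih]
      · by_cases hd : c = '1' ∨ c = '2' ∨ c = '0'
        · simp [pvStepA, pvGoA, hc, hd, ih]
        · simp [pvStepA, pvGoA, hc, hd, ih]

lemma pvGoA_eq (cs : List Char) (a : List Int) :
    pvGoA a cs =
      (((a ++ pvExtract (pvMySplit cs).headI) :: (pvMySplit cs).tail.map pvExtract).dropLast).filter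
        (fun t => !t.isEmpty) := by
  induction cs generalizing a with
  | nil => simp [pvGoA, pvMySplit, pvExtract]
  | cons c rest ih =>
      obtain ⟨g, gs, hg⟩ : ∃ g gs, pvMySplit rest = g :: gs := by
        cases h : pvMySplit rest with
        | nil => exact absurd h (pvMySplit_ne_nil rest)
        | cons g gs => exact ⟨g, gs, rfl⟩
      by_cases hc : c = ')'
      · subst hc
        by_cases ha : a = []
        · simp [pvGoA, pvMySplit, ha, ih, hg, pvExtract]
        · simp [pvGoA, pvMySplit, ha, ih, hg, pvExtract]
      · by_cases hd : c = '1' ∨ c = '2' ∨ c = '0'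
        · have hfilter : pvExtract (c :: g) = ((c.toNat : Int) - 48) :: pvExtract g := by
            rcases hd with h | h | h <;> subst h <;> simp [pvExtract]
          simp only [pvGoA, hc, if_false, hd, if_true, ih, pvMySplit, hg]
          simp [hfilter]
        · have hfilter : pvExtract (c :: g) = pvExtract g := by
            have hb : (c == '0' || c == '1' || c == '2') = false := by
              simp only [Bool.or_eq_false_iff, beq_eq_false_iff_ne]
              exact ⟨⟨fun h => hd (Or.inr (Or.inr h)), fun h => hd (Or.inl h)⟩,
                     fun h => hd (Or.inr (Or.inl h))⟩
            simp [pvExtract, hb]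
          simp only [pvGoA, hc, if_false, hd, if_false, ih, pvMySplit, hg]
          simp [hfilter]

-- ===== VERDICT (by name: the statement is the Claim_ definition above) =====
theorem string_to_tuple_spec : Claim_equal_string_to_tuple := by
  intro state _
  unfold Spec_string_to_tuple string_to_tuple string_to_tuple_alt
  rw [pvFoldA_spec, pvGoA_eq, pvSplitOn_eq]
  obtain ⟨g, gs, hg⟩ : ∃ g gs, pvMySplit state.toList = g :: gs := by
    cases h : pvMySplit state.toList with
    | nil => exact absurd h (pvMySplit_ne_nil state.toList)
    | cons g gs => exact ⟨g, gs, rfl⟩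
  simp [hg, List.map_dropLast]
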